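-- pv_equiv track=rewrite | github.com/inextor/pyninos | compressor16.py | compress_positions
-- ===== SOURCE A (Python) =====
-- def compress_positions(pos_list):
--     """Normalize a position list"""
--     cp_pos_list = pos_list.copy()
--     new_pos = []
--
--     for i in range(0, len(pos_list)):
--         for index, value in enumerate(cp_pos_list):
--             if i == value:
--                 new_pos.append(index)
--                 cp_pos_list.pop(index)
--                 break
--
--     return new_pos
-- ===== SOURCE B (Python) =====
-- def compress_positions(pos_list):
--     """Normalize a position list"""
--     n = len(pos_list)
--     first = {}
--     for j, v in enumerate(pos_list):
--         if 0 <= v < n and v not in first: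
--             first[v] = j
--     taken = []
--     new_pos = []
--     for i in range(n):
--         j = first.get(i)
--         if j is not None:
--             new_pos.append(j - sum(1 for t in taken if t < j))
--             taken.append(j)
--     return new_pos
-- ===== Notes on version B (the rewrite author's own statement) =====
-- stated objective: faster
-- what changed: B replaces A's per-value rescan-and-pop of a mutated copy (Theta(n^2) always) by one pass building a first-occurrence dict for values in [0,n), then per present value computes the answer arithmetically as its original first index minus the count of previously taken indices before it (O(n + m^2), m = number of distinct values of [0,n) present).
import Mathlib
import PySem

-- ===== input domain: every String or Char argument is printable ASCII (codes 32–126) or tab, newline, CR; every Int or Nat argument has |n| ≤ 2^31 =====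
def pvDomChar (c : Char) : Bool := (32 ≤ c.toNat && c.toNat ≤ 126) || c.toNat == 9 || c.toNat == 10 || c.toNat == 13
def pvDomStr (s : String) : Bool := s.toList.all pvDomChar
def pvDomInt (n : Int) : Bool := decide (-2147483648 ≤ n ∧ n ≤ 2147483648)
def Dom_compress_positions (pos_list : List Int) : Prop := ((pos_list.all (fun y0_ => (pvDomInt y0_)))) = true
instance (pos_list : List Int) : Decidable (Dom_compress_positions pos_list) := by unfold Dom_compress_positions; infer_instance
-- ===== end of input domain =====

-- B replaces A's repeated scan-and-pop of a mutated copy by a first-occurrence dictionary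
-- plus arithmetic on taken indices (alternative decomposition; equal return value proved below).

-- ===== PORT A =====
-- inner 'for index, value in enumerate(cp): if i == value: … break'
def scanA (i : Int) : List Int → Nat → Option Nat
  | [], _ => none
  | v :: rest, idx => if i == v then some idx else scanA i rest (idx + 1)

def stepA (st : List Int × List Int) (i : Int) : List Int × List Int :=
  match scanA i st.1 0 with
  | some idx => (st.1.eraseIdx idx, st.2 ++ [(idx : Int)])
  | none => st

def compress_positions (pos_list : List Int) : List Int :=
  ((PySem.List.pyRange 0 (pos_list.length : Int) 1).foldl stepA (pos_list, [])).2

-- ===== PORT B =====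
-- first pass: dict of first occurrences of values in [0, n)
def buildFirst (pos_list : List Int) : PySem.Dict Int Int :=
  (PySem.List.enumerate pos_list).foldl
    (fun d jv =>
      if 0 ≤ jv.2 ∧ jv.2 < (pos_list.length : Int) ∧ (d.get? jv.2).isNone = true then
        d.insert jv.2 jv.1
      else d)
    PySem.Dict.empty

-- second pass: st = (taken, new_pos); 'sum(1 for t in taken if t < j)' is the countP
def stepB (first : PySem.Dict Int Int) (st : List Int × List Int) (i : Int) : List Int × List Int :=
  match first.get? i with
  | some j => (st.1 ++ [j], st.2 ++ [j - (st.1.countP (fun t => decide (t < j)) : Int)])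
  | none => st

def compress_positions_alt (pos_list : List Int) : List Int :=
  ((PySem.List.pyRange 0 (pos_list.length : Int) 1).foldl
      (stepB (buildFirst pos_list)) ([], [])).2

-- ===== PRECONDITION & SPEC =====
def Spec_compress_positions (pos_list : List Int) (out : List Int) : Prop := out = compress_positions_alt pos_list
instance (pos_list : List Int) (out : List Int) : Decidable (Spec_compress_positions pos_list out) := by unfold Spec_compress_positions; infer_instance

-- ===== CLAIM (what is proved, stated in full; the proofs are below) =====
def Claim_equal_compress_positions : Prop := ∀ (pos_list : List Int), Dom_compress_positions pos_list → Spec_compress_positions pos_list (compress_positions pos_list)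

-- ===== LEMMAS AND PROOFS =====

-- the list A's copy has become after removing the first occurrences recorded in tk
def remaining' (xs : List Int) (s : Int) (tk : List Int) : List Int :=
  ((PySem.List.enumerate xs s).filter (fun p => !(tk.contains p.1))).map (·.2)

-- number of taken indices in [a, b)
def cntIn (tk : List Int) (a b : Int) : Nat := tk.countP (fun t => decide (a ≤ t ∧ t < b))

-- B's taken list after k iterations
def tkSpec (l : List Int) (k : Nat) : List Int :=
  (List.range k).filterMap (fun (v : Nat) => (PySem.List.index? l (v : Int)).map (fun (j : Nat) => (j : Int)))

lemma scanA_eq (i : Int) (cp : List Int) (c : Nat) :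
    scanA i cp c = (PySem.List.index? cp i).map (· + c) := by
  induction cp generalizing c with
  | nil => simp [scanA, PySem.List.index?_eq_idxOf?, List.idxOf?]
  | cons v rest ih =>
    by_cases h : i = v
    · subst h
      rw [PySem.List.index?_cons_self i rest]
      simp [scanA]
    · rw [PySem.List.index?_cons_of_ne rest (fun hvi => h hvi.symm)]
      rw [scanA, if_neg (by simpa using h), ih]
      cases PySem.List.index? rest i
      · simp
      · simp
        omega

lemma cnt_empty (tk : List Int) (a b : Int) (h : b ≤ a) : cntIn tk a b = 0 := by
  rw [cntIn, List.countP_eq_zero]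
  intro t _
  simp only [decide_eq_true_eq, not_and]
  omega

lemma cnt_not_mem (tk : List Int) (a b : Int) (h : a ∉ tk) :
    cntIn tk a b = cntIn tk (a + 1) b := by
  rw [cntIn, cntIn]
  apply List.countP_congr
  intro t ht
  have : t ≠ a := fun he => h (he ▸ ht)
  simp only [decide_eq_true_eq]
  constructor <;> intro <;> omega

lemma cnt_mem (tk : List Int) (a b : Int) (hnd : tk.Nodup) (hm : a ∈ tk) (hb : a < b) :
    cntIn tk a b = cntIn tk (a + 1) b + 1 := by
  induction tk with
  | nil => cases hm
  | cons t rest ih =>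
    have hndr : rest.Nodup := hnd.of_cons
    have htr : t ∉ rest := (List.nodup_cons.mp hnd).1
    rcases List.mem_cons.mp hm with he | hm'
    · subst he
      have hr := cnt_not_mem rest a b htr
      rw [cntIn, cntIn, List.countP_cons, List.countP_cons]
      simp only [cntIn] at hr
      rw [hr]
      have h1 : decide (a ≤ a ∧ a < b) = true := by simp; omega
      have h2 : decide (a + 1 ≤ a ∧ a < b) = false := by simp
      rw [h1, h2]
      simp
    · have hta : t ≠ a := fun he => htr (he ▸ hm')
      have hrec := ih hndr hm'
      rw [cntIn, cntIn, List.countP_cons, List.countP_cons]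
      simp only [cntIn] at hrec
      rw [hrec]
      have hd : (a ≤ t ∧ t < b) ↔ (a + 1 ≤ t ∧ t < b) := by
        constructor <;> intro <;> (constructor <;> omega)
      rw [decide_eq_decide.mpr hd]
      cases decide (a + 1 ≤ t ∧ t < b) <;> simp

lemma cnt_le (tk : List Int) (a b : Int) (hnd : tk.Nodup) (hab : a ≤ b) :
    (cntIn tk a b : Int) ≤ b - a := by
  classical
  rw [cntIn, List.countP_eq_length_filter]
  have h1 : (tk.filter (fun t => decide (a ≤ t ∧ t < b))).Nodup := hnd.filter _
  have h2 : (tk.filter (fun t => decide (a ≤ t ∧ t < b))) ⊆ PySem.List.pyRange a b 1 := by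
    intro t ht
    rw [List.mem_filter] at ht
    rw [PySem.List.mem_pyRange_one]
    simpa using ht.2
  have h3 : (tk.filter (fun t => decide (a ≤ t ∧ t < b))).length
      ≤ (PySem.List.pyRange a b 1).length := by
    calc _ = (tk.filter _).toFinset.card := (List.toFinset_card_of_nodup h1).symm
    _ ≤ (PySem.List.pyRange a b 1).toFinset.card :=
        Finset.card_le_card (by intro x hx; simp only [List.mem_toFinset] at hx ⊢; exact h2 hx)
    _ ≤ _ := List.toFinset_card_le _
  rw [PySem.List.length_pyRange_one] at h3
  omega

lemma remaining'_nil_tk (xs : List Int) (s : Int) : remaining' xs s [] = xs := by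
  simp [remaining', PySem.List.map_snd_enumerate]

lemma mem_remaining' (xs : List Int) (s : Int) (tk : List Int) (x : Int)
    (h : x ∈ remaining' xs s tk) : x ∈ xs := by
  simp only [remaining', List.mem_map, List.mem_filter] at h
  obtain ⟨p, ⟨hp, -⟩, hpx⟩ := h
  obtain ⟨k, hk, rfl⟩ := (PySem.List.mem_enumerate_iff xs s p).mp hp
  subst hpx
  exact List.getElem_mem hk

lemma remaining'_congr (xs : List Int) (s : Int) (tk tk' : List Int)
    (h : ∀ t : Int, s ≤ t → t < s + xs.length → (t ∈ tk ↔ t ∈ tk')) :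
    remaining' xs s tk = remaining' xs s tk' := by
  unfold remaining'
  congr 1
  apply List.filter_congr
  intro p hp
  obtain ⟨k, hk, rfl⟩ := (PySem.List.mem_enumerate_iff xs s p).mp hp
  have hmm := h (s + k) (by omega) (by push_cast; omega)
  simpa using hmm

lemma remaining'_cons (x : Int) (xs : List Int) (s : Int) (tk : List Int) :
    remaining' (x :: xs) s tk
      = (if tk.contains s then ([] : List Int) else [x]) ++ remaining' xs (s + 1) tk := by
  rw [remaining', PySem.List.enumerate_cons, List.filter_cons]
  by_cases hc : tk.contains s = true
  · simp only [hc]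
    simp [remaining']
  · simp only [Bool.not_eq_true] at hc
    simp only [hc]
    simp [remaining']

lemma rem_index (xs : List Int) (s : Int) (tk : List Int) (i : Int)
    (hnd : tk.Nodup)
    (hne : ∀ (k : Nat) (h : k < xs.length), ((s + k : Int) ∈ tk) → xs[k] ≠ i) :
    PySem.List.index? (remaining' xs s tk) i
      = (PySem.List.index? xs i).map (fun (j : Nat) => j - cntIn tk s (s + (j : Int))) := by
  induction xs generalizing s with
  | nil => simp [remaining', PySem.List.enumerate_nil, PySem.List.index?_eq_idxOf?]
  | cons x xs ih =>
    rw [remaining'_cons]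
    have hne' : ∀ (k : Nat) (h : k < xs.length), ((s + 1 + (k : Int)) ∈ tk) → xs[k] ≠ i := by
      intro k hk hmem
      have h2 : ((k + 1 : Nat) : Int) = (k : Int) + 1 := by push_cast; ring
      have := hne (k + 1) (by simpa using Nat.succ_lt_succ hk)
        (by rw [h2, show s + ((k : Int) + 1) = s + 1 + (k : Int) by ring]; exact hmem)
      simpa using this
    by_cases hs : s ∈ tk
    · rw [if_pos (List.contains_iff_mem.mpr hs), List.nil_append]
      have hx : x ≠ i := by
        have := hne 0 (by simp) (by simpa using hs)
        simpa using this
      rw [ih (s + 1) hne', PySem.List.index?_cons_of_ne xs hx]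
      cases hj : PySem.List.index? xs i with
      | none => simp
      | some j =>
        simp only [Option.map_some]
        congr 1
        have hb : s + ((j + 1 : Nat) : Int) = s + (j : Int) + 1 := by push_cast; ring
        rw [hb]
        have hcnt := cnt_mem tk s (s + (j : Int) + 1) hnd hs (by omega)
        have hb2 : s + 1 + (j : Int) = s + (j : Int) + 1 := by ring
        rw [hb2] at *
        omega
    · have hcontains : tk.contains s = false := by
        cases hcon : tk.contains s
        · rfl
        · exact absurd (List.contains_iff_mem.mp hcon) hs
      rw [hcontains]
      simp only [Bool.false_eq_true, if_false]
      by_cases hx : x = i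
      · subst hx
        rw [List.singleton_append, PySem.List.index?_cons_self, PySem.List.index?_cons_self]
        simp
      · rw [List.singleton_append, PySem.List.index?_cons_of_ne _ hx,
            PySem.List.index?_cons_of_ne xs hx, ih (s + 1) hne']
        cases hj : PySem.List.index? xs i with
        | none => simp
        | some j =>
          simp only [Option.map_some]
          congr 1
          have hb : s + ((j + 1 : Nat) : Int) = s + (j : Int) + 1 := by push_cast; ring
          rw [hb]
          have hc1 := cnt_not_mem tk s (s + (j : Int) + 1) hs
          have hb2 : s + 1 + (j : Int) = s + (j : Int) + 1 := by ring
          rw [hb2] at *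
          have hle := cnt_le tk (s + 1) (s + (j : Int) + 1) hnd (by omega)
          omega

lemma rem_erase (xs : List Int) (s : Int) (tk : List Int) (J : Int)
    (hnd : tk.Nodup) (hs : s ≤ J) (hlt : J < s + xs.length) (hJ : J ∉ tk) :
    remaining' xs s (tk ++ [J])
      = (remaining' xs s tk).eraseIdx (J - s - cntIn tk s J).toNat := by
  induction xs generalizing s with
  | nil => simp at hlt; omega
  | cons x xs ih =>
    have hlt' : J < s + 1 + (xs.length : Int) := by simp at hlt; omega
    rw [remaining'_cons, remaining'_cons]
    by_cases hsJ : s = J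
    · have hc1 : (tk ++ [J]).contains s = true := by
        rw [List.contains_iff_mem]; simp [hsJ]
      have hc2 : tk.contains s = false := by
        cases hcon : tk.contains s
        · rfl
        · exact absurd (hsJ ▸ List.contains_iff_mem.mp hcon) hJ
      rw [hc1, hc2]
      simp only [if_pos rfl, Bool.false_eq_true, if_false, List.nil_append, List.singleton_append]
      rw [show cntIn tk s J = 0 from hsJ ▸ cnt_empty tk s s le_rfl]
      rw [show (J - s - ((0 : Nat) : Int)).toNat = 0 by omega, List.eraseIdx_cons_zero]
      apply remaining'_congr
      intro t ht1 ht2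
      simp only [List.mem_append, List.mem_singleton]
      constructor
      · rintro (h | h)
        · exact h
        · omega
      · exact Or.inl
    · have hsJ' : s < J := by omega
      by_cases hsm : s ∈ tk
      · have hc1 : (tk ++ [J]).contains s = true := by
          rw [List.contains_iff_mem]; simp [hsm]
        have hc2 : tk.contains s = true := List.contains_iff_mem.mpr hsm
        rw [hc1, hc2]
        simp only [if_pos rfl, List.nil_append]
        rw [ih (s + 1) (by omega) hlt']
        have hcnt := cnt_mem tk s J hnd hsm hsJ'
        have heq : (J - s - (cntIn tk s J : Int)).toNat
            = (J - (s + 1) - (cntIn tk (s + 1) J : Int)).toNat := by omega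
        rw [heq]
        exact rfl
      · have hc1 : (tk ++ [J]).contains s = false := by
          cases hcon : (tk ++ [J]).contains s
          · rfl
          · have := List.contains_iff_mem.mp hcon
            simp only [List.mem_append, List.mem_singleton] at this
            rcases this with h | h
            · exact absurd h hsm
            · omega
        have hc2 : tk.contains s = false := by
          cases hcon : tk.contains s
          · rfl
          · exact absurd (List.contains_iff_mem.mp hcon) hsm
        rw [hc1, hc2]
        simp only [Bool.false_eq_true, if_false, List.singleton_append]
        have hcn := cnt_not_mem tk s J hsm
        have hle := cnt_le tk (s + 1) J hnd (by omega)
        have hpos : (J - s - (cntIn tk s J : Int)).toNat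
            = (J - (s + 1) - (cntIn tk (s + 1) J : Int)).toNat + 1 := by
          omega
        rw [hpos, List.eraseIdx_cons_succ, ih (s + 1) (by omega) hlt']

lemma mem_tkSpec (l : List Int) (k : Nat) (t : Int) :
    t ∈ tkSpec l k ↔ ∃ v j : Nat, v < k ∧ PySem.List.index? l (v : Int) = some j ∧ t = (j : Int) := by
  rw [tkSpec, List.mem_filterMap]
  constructor
  · rintro ⟨v, hv, hj⟩
    obtain ⟨j, hj', hjt⟩ := Option.map_eq_some_iff.mp hj
    exact ⟨v, j, List.mem_range.mp hv, hj', hjt.symm⟩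
  · rintro ⟨v, j, hv, hj, rfl⟩
    exact ⟨v, List.mem_range.mpr hv, by rw [hj]; rfl⟩

lemma tkSpec_nodup (l : List Int) (k : Nat) : (tkSpec l k).Nodup := by
  rw [tkSpec]
  apply List.Nodup.filterMap _ (List.nodup_range)
  intro v v' t hv hv'
  simp only [Option.mem_def, Option.map_eq_some_iff] at hv hv'
  obtain ⟨j, hj, hjt⟩ := hv
  obtain ⟨j', hj', hjj⟩ := hv'
  rw [← hjt] at hjj
  have hj2 : j' = j := by exact_mod_cast hjj
  subst hj2
  obtain ⟨hk, hval, -⟩ := PySem.List.getElem_of_index?_eq_some hj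
  obtain ⟨hk', hval', -⟩ := PySem.List.getElem_of_index?_eq_some hj'
  have : ((v : Int)) = (v' : Int) := by rw [← hval, ← hval']
  exact_mod_cast this

lemma dictFold_get (n : Int) (xs : List Int) (s : Int) (d : PySem.Dict Int Int) (v : Int) :
    ((PySem.List.enumerate xs s).foldl
        (fun d jv =>
          if 0 ≤ jv.2 ∧ jv.2 < n ∧ (d.get? jv.2).isNone = true then d.insert jv.2 jv.1 else d)
        d).get? v
      = if (d.get? v).isSome then d.get? v
        else if 0 ≤ v ∧ v < n then (PySem.List.index? xs v).map (fun (j : Nat) => s + (j : Int))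
        else none := by
  induction xs generalizing s d with
  | nil =>
    rw [PySem.List.enumerate_nil]
    simp only [List.foldl_nil, PySem.List.index?_eq_idxOf?, List.idxOf?]
    cases hd : d.get? v with
    | some w => simp
    | none => simp [List.findIdx?, List.findIdx?.go]
  | cons x xs ih =>
    rw [PySem.List.enumerate_cons, List.foldl_cons]
    rw [ih]
    by_cases hC : 0 ≤ x ∧ x < n ∧ (d.get? x).isNone = true
    · rw [if_pos hC]
      by_cases hv : v = x
      · subst hv
        have hnone : d.get? v = none := Option.isNone_iff_eq_none.mp hC.2.2
        rw [PySem.Dict.get?_insert_self, hnone]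
        simp only [Option.isSome_some, Option.isSome_none, Bool.false_eq_true, if_true, if_false]
        rw [if_pos ⟨hC.1, hC.2.1⟩, PySem.List.index?_cons_self]
        simp
      · rw [PySem.Dict.get?_insert_of_ne d s hv]
        rw [PySem.List.index?_cons_of_ne xs (fun h => hv h.symm)]
        cases hd : d.get? v with
        | some w => simp
        | none =>
          simp only [Option.isSome_none, Bool.false_eq_true, if_false]
          by_cases hr : 0 ≤ v ∧ v < n
          · rw [if_pos hr, if_pos hr]
            cases PySem.List.index? xs v with
            | none => simp
            | some j =>
              simp only [Option.map_some]
              congr 1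
              push_cast
              ring
          · rw [if_neg hr, if_neg hr]
    · rw [if_neg hC]
      by_cases hv : v = x
      · subst hv
        cases hd : d.get? v with
        | some w => simp
        | none =>
          have hr : ¬ (0 ≤ v ∧ v < n) := by
            intro hvr
            exact hC ⟨hvr.1, hvr.2, by rw [hd]; rfl⟩
          simp only [Option.isSome_none, Bool.false_eq_true, if_false]
          rw [if_neg hr, if_neg hr]
      · rw [PySem.List.index?_cons_of_ne xs (fun h => hv h.symm)]
        cases hd : d.get? v with
        | some w => simp
        | none =>
          simp only [Option.isSome_none, Bool.false_eq_true, if_false]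
          by_cases hr : 0 ≤ v ∧ v < n
          · rw [if_pos hr, if_pos hr]
            cases PySem.List.index? xs v with
            | none => simp
            | some j =>
              simp only [Option.map_some]
              congr 1
              push_cast
              ring
          · rw [if_neg hr, if_neg hr]

lemma buildFirst_get? (l : List Int) (v : Int) :
    (buildFirst l).get? v
      = if 0 ≤ v ∧ v < (l.length : Int)
        then (PySem.List.index? l v).map (fun (j : Nat) => (j : Int))
        else none := by
  rw [buildFirst, dictFold_get]
  rw [show (PySem.Dict.empty : PySem.Dict Int Int).get? v = none from PySem.Dict.get?_empty v]
  simp only [Option.isSome_none, Bool.false_eq_true, if_false]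
  by_cases hr : 0 ≤ v ∧ v < (l.length : Int)
  · rw [if_pos hr, if_pos hr]
    cases PySem.List.index? l v with
    | none => simp
    | some j => simp
  · rw [if_neg hr, if_neg hr]

lemma main_inv (l : List Int) : ∀ k : Nat, k ≤ l.length →
    (((PySem.List.pyRange 0 (k : Int) 1).foldl (stepB (buildFirst l)) ([], [])).1 = tkSpec l k)
    ∧ (((PySem.List.pyRange 0 (k : Int) 1).foldl stepA (l, [])).1 = remaining' l 0 (tkSpec l k))
    ∧ (((PySem.List.pyRange 0 (k : Int) 1).foldl stepA (l, [])).2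
        = ((PySem.List.pyRange 0 (k : Int) 1).foldl (stepB (buildFirst l)) ([], [])).2) := by
  intro k
  induction k with
  | zero =>
    intro _
    rw [show ((0 : Nat) : Int) = 0 by simp, PySem.List.pyRange_one_eq_nil le_rfl]
    simp only [List.foldl_nil]
    refine ⟨?_, ?_, ?_⟩
    · simp [tkSpec]
    · rw [show tkSpec l 0 = [] by simp [tkSpec]]
      exact (remaining'_nil_tk l 0).symm
    · trivial
  | succ k ih =>
    intro hk1
    have hk' : k ≤ l.length := by omega
    obtain ⟨hB1, hA1, hout⟩ := ih hk'
    have hklen : k < l.length := by omega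
    have hsplit : PySem.List.pyRange 0 ((k + 1 : Nat) : Int) 1
        = PySem.List.pyRange 0 (k : Int) 1 ++ [(k : Int)] := by
      rw [show ((k + 1 : Nat) : Int) = (k : Int) + 1 by push_cast; ring,
          PySem.List.pyRange_one_succ_right (by omega)]
    rw [hsplit, List.foldl_append, List.foldl_append]
    simp only [List.foldl_cons, List.foldl_nil]
    have hget : (buildFirst l).get? (k : Int)
        = (PySem.List.index? l (k : Int)).map (fun (j : Nat) => (j : Int)) := by
      rw [buildFirst_get?, if_pos ⟨by omega, by exact_mod_cast hklen⟩]
    cases hidx : PySem.List.index? l (k : Int) with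
    | none =>
      have hsB : stepB (buildFirst l)
          ((PySem.List.pyRange 0 (k : Int) 1).foldl (stepB (buildFirst l)) ([], [])) (k : Int)
          = (PySem.List.pyRange 0 (k : Int) 1).foldl (stepB (buildFirst l)) ([], []) := by
        rw [stepB, hget, hidx]
        rfl
      have hknotin : (k : Int) ∉ l := (PySem.List.index?_eq_none_iff l _).mp hidx
      have hremnone : PySem.List.index? (remaining' l 0 (tkSpec l k)) (k : Int) = none := by
        rw [PySem.List.index?_eq_none_iff]
        intro hmem
        exact hknotin (mem_remaining' _ _ _ _ hmem)
      have hsA : stepA ((PySem.List.pyRange 0 (k : Int) 1).foldl stepA (l, [])) (k : Int)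
          = (PySem.List.pyRange 0 (k : Int) 1).foldl stepA (l, []) := by
        rw [stepA, scanA_eq, hA1, hremnone]
        rfl
      have htk : tkSpec l (k + 1) = tkSpec l k := by
        rw [tkSpec, List.range_succ, List.filterMap_append]
        simp [tkSpec]
        exact hknotin
      rw [hsA, hsB, htk]
      exact ⟨hB1, hA1, hout⟩
    | some j =>
      obtain ⟨hjlen, hval, hbefore⟩ := PySem.List.getElem_of_index?_eq_some hidx
      have hnd := tkSpec_nodup l k
      have hne : ∀ (m : Nat) (hm : m < l.length), ((0 + (m : Int)) ∈ tkSpec l k) → l[m] ≠ (k : Int) := by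
        intro m hm hmem
        rw [zero_add] at hmem
        obtain ⟨v, j2, hvk, hj2, hcast⟩ := (mem_tkSpec l k _).mp hmem
        have hj2m : j2 = m := by exact_mod_cast hcast.symm
        subst hj2m
        obtain ⟨h1, h2, -⟩ := PySem.List.getElem_of_index?_eq_some hj2
        intro hcontra
        have hvk2 : ((v : Int)) = (k : Int) := by rw [← h2]; exact hcontra
        have : v = k := by exact_mod_cast hvk2
        omega
      have hJnotin : (j : Int) ∉ tkSpec l k := by
        intro hmem
        obtain ⟨v, j2, hvk, hj2, hcast⟩ := (mem_tkSpec l k _).mp hmem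
        have hj2j : j2 = j := by exact_mod_cast hcast.symm
        subst hj2j
        obtain ⟨h1, h2, -⟩ := PySem.List.getElem_of_index?_eq_some hj2
        have hvk2 : ((v : Int)) = (k : Int) := by rw [← h2]; exact hval
        have : v = k := by exact_mod_cast hvk2
        omega
      have hremidx : PySem.List.index? (remaining' l 0 (tkSpec l k)) (k : Int)
          = some (j - cntIn (tkSpec l k) 0 ((j : Int))) := by
        rw [rem_index l 0 (tkSpec l k) (k : Int) hnd hne, hidx]
        simp
      have hc_le : (cntIn (tkSpec l k) 0 (j : Int) : Int) ≤ (j : Int) := by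
        have := cnt_le (tkSpec l k) 0 (j : Int) hnd (by omega)
        omega
      have hcountP : (tkSpec l k).countP (fun t => decide (t < (j : Int)))
          = cntIn (tkSpec l k) 0 (j : Int) := by
        rw [cntIn]
        apply List.countP_congr
        intro t ht
        obtain ⟨v, j2, hvk, hj2, hcast⟩ := (mem_tkSpec l k t).mp ht
        subst hcast
        have h0 : (0 : Int) ≤ (j2 : Int) := by omega
        by_cases h : ((j2 : Int)) < (j : Int)
        · simp [h, h0]
        · simp [h]
      have hsA : stepA ((PySem.List.pyRange 0 (k : Int) 1).foldl stepA (l, [])) (k : Int)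
          = (((PySem.List.pyRange 0 (k : Int) 1).foldl stepA (l, [])).1.eraseIdx
                (j - cntIn (tkSpec l k) 0 (j : Int)),
             ((PySem.List.pyRange 0 (k : Int) 1).foldl stepA (l, [])).2
                ++ [((j - cntIn (tkSpec l k) 0 (j : Int) : Nat) : Int)]) := by
        rw [stepA, scanA_eq, hA1, hremidx]
        simp
      have hsB : stepB (buildFirst l)
          ((PySem.List.pyRange 0 (k : Int) 1).foldl (stepB (buildFirst l)) ([], [])) (k : Int)
          = (((PySem.List.pyRange 0 (k : Int) 1).foldl (stepB (buildFirst l)) ([], [])).1 ++ [(j : Int)],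
             ((PySem.List.pyRange 0 (k : Int) 1).foldl (stepB (buildFirst l)) ([], [])).2
                ++ [(j : Int) - (((PySem.List.pyRange 0 (k : Int) 1).foldl (stepB (buildFirst l)) ([], [])).1.countP
                      (fun t => decide (t < (j : Int))) : Int)]) := by
        rw [stepB, hget, hidx]
        rfl
      have hidx' : List.idxOf? ((k : Int)) l = some j := by
        rw [← PySem.List.index?_eq_idxOf?]; exact hidx
      have htk : tkSpec l (k + 1) = tkSpec l k ++ [(j : Int)] := by
        rw [tkSpec, List.range_succ, List.filterMap_append]
        simp [hidx', tkSpec]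
      refine ⟨?_, ?_, ?_⟩
      · rw [hsB, htk, hB1]
      · rw [hsA, htk, hA1]
        rw [rem_erase l 0 (tkSpec l k) (j : Int) hnd (by omega)
              (by rw [zero_add]; exact_mod_cast hjlen) hJnotin]
        have heq : ((j : Int) - 0 - (cntIn (tkSpec l k) 0 (j : Int) : Int)).toNat
            = j - cntIn (tkSpec l k) 0 (j : Int) := by omega
        rw [heq]
      · rw [hsA, hsB, hout, hB1, hcountP]
        have heq : ((j - cntIn (tkSpec l k) 0 (j : Int) : Nat) : Int)
            = (j : Int) - (cntIn (tkSpec l k) 0 (j : Int) : Int) := by omega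
        rw [heq]

-- ===== VERDICT (by name: the statement is the Claim_ definition above) =====
theorem compress_positions_spec : Claim_equal_compress_positions := by
  intro pos_list _
  unfold Spec_compress_positions
  exact (main_inv pos_list pos_list.length le_rfl).2.2
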